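-- pv_equiv track=rewrite | github.com/eFLAWS/ESGI-L2 | AlgoAvancée/exo2 (1).py | rechDoublons
-- ===== SOURCE A (Python) =====
-- def rechDoublons(tab) :
--     x = False
--     for i in range (0, len(tab)-1) :
--         for j in range (i+1,len(tab)) :
--             if i != j :
--                 if tab[i] == tab[j] :
--                     if x == False : x  = True
--                     else : return False
--                     break
--     if x == True : return True
--     return False
-- ===== SOURCE B (Python) =====
-- def rechDoublons(tab):
--     seen = []
--     count = 0
--     for element in tab:
--         if element in seen:
--             count += 1
--         else:
--             seen.append(element)
--     return count == 1
-- ===== Notes on version B (the rewrite author's own statement) =====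
-- stated objective: simpler
-- what changed: Replaced A's triangular all-pairs index scan with early exit by a single forward pass that maintains a 'seen' list and counts elements already seen, returning count == 1.
import Mathlib
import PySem

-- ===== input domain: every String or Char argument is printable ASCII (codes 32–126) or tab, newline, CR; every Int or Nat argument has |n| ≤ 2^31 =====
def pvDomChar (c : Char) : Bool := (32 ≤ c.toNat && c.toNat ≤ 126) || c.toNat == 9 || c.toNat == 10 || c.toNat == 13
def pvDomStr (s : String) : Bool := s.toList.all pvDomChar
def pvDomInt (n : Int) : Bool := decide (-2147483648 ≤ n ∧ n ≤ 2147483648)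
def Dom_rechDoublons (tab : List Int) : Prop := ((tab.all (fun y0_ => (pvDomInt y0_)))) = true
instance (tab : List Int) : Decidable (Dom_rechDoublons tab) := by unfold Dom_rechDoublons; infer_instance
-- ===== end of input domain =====

-- B replaces A's triangular all-pairs comparison by a single forward pass with a
-- growing 'seen' list and a duplicate counter (objective: simpler).

-- ===== PORT A =====
-- inner loop over j: look for the first j with tab[i] == tab[j] (the break means
-- only existence of a match matters for the outer logic)
def pvInnerA (tab : List Int) (i : Int) : List Int → Bool
  | [] => false
  | j :: rest =>
    if i ≠ j then
      if PySem.List.pyGet? tab i = PySem.List.pyGet? tab j then true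
      else pvInnerA tab i rest
    else pvInnerA tab i rest

-- outer loop over i with the flag x; returning false for the second matching i
def pvOuterA (tab : List Int) : List Int → Bool → Bool
  | [], x => x
  | i :: rest, x =>
    if pvInnerA tab i (PySem.List.pyRange (i + 1) (tab.length : Int) 1) then
      if x = false then pvOuterA tab rest true else false
    else pvOuterA tab rest x

def rechDoublons (tab : List Int) : Bool :=
  pvOuterA tab (PySem.List.pyRange 0 ((tab.length : Int) - 1) 1) false

-- ===== PORT B =====
-- single pass: seen list + duplicate count
def pvLoopB (seen : List Int) (count : Int) : List Int → Int
  | [] => count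
  | t :: rest =>
    if seen.contains t then pvLoopB seen (count + 1) rest
    else pvLoopB (seen ++ [t]) count rest

def rechDoublons_alt (tab : List Int) : Bool :=
  decide (pvLoopB [] 0 tab = 1)

-- ===== PRECONDITION & SPEC =====
def Spec_rechDoublons (tab : List Int) (out : Bool) : Prop := out = rechDoublons_alt tab
instance (tab : List Int) (out : Bool) : Decidable (Spec_rechDoublons tab out) := by unfold Spec_rechDoublons; infer_instance

-- ===== CLAIM (what is proved, stated in full; the proofs are below) =====
def Claim_equal_rechDoublons : Prop := ∀ (tab : List Int), Dom_rechDoublons tab → Spec_rechDoublons tab (rechDoublons tab)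

-- ===== LEMMAS AND PROOFS =====

-- number of positions with a LATER equal element (A's quantity)
def pvG : List Int → Nat
  | [] => 0
  | t :: r => (if r.contains t then 1 else 0) + pvG r

-- number of positions with an EARLIER equal element, given already-seen prefix (B's quantity)
def pvH (seen : List Int) : List Int → Nat
  | [] => 0
  | t :: r => if seen.contains t then 1 + pvH seen r else pvH (seen ++ [t]) r

lemma pvInnerA_eq (tab : List Int) (k : Nat) (hk : k < tab.length) :
    ∀ d m : Nat, tab.length - m = d → k < m →
      pvInnerA tab (k : Int) (PySem.List.pyRange (m : Int) (tab.length : Int) 1)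
        = (tab.drop m).contains tab[k] := by
  intro d
  induction d with
  | zero =>
    intro m hd _
    have hm : tab.length ≤ m := by omega
    rw [PySem.List.pyRange_one_eq_nil (by exact_mod_cast hm), List.drop_eq_nil_of_le hm]
    simp [pvInnerA]
  | succ d ih =>
    intro m hd hkm
    have hm : m < tab.length := by omega
    rw [PySem.List.pyRange_one_cons (by exact_mod_cast hm)]
    rw [List.drop_eq_getElem_cons hm]
    have hne : (k : Int) ≠ (m : Int) := by
      intro hx; exact absurd (by exact_mod_cast hx : k = m) (Nat.ne_of_lt hkm)
    have hgk : PySem.List.pyGet? tab (k : Int) = some tab[k] := by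
      simp [pysem, List.getElem?_eq_getElem hk]
    have hgm : PySem.List.pyGet? tab (m : Int) = some tab[m] := by
      simp [pysem, List.getElem?_eq_getElem hm]
    have hcast : ((m : Int) + 1) = ((m + 1 : Nat) : Int) := by push_cast; ring
    simp only [pvInnerA, hgk, hgm, hcast]
    by_cases he : tab[k] = tab[m]
    · rw [if_pos hne, if_pos (by rw [he])]
      simp
      rw [List.drop_eq_getElem_cons hm, he]
      exact List.mem_cons.mpr (Or.inl rfl)
    · rw [if_pos hne, if_neg (by simpa using he)]
      rw [ih (m + 1) (by omega) (by omega)]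
      simp
      rw [List.drop_eq_getElem_cons hm, List.mem_cons]
      exact ⟨Or.inr, fun hx => hx.resolve_left he⟩

lemma pvOuterA_eq (tab : List Int) :
    ∀ d (k : Nat) (x : Bool), tab.length - k = d →
      pvOuterA tab (PySem.List.pyRange (k : Int) ((tab.length : Int) - 1) 1) x
        = decide ((cond x 1 0) + pvG (tab.drop k) = 1) := by
  intro d
  induction d with
  | zero =>
    intro k x hd
    have hm : tab.length ≤ k := by omega
    rw [PySem.List.pyRange_one_eq_nil (by omega), List.drop_eq_nil_of_le hm]
    cases x <;> simp [pvOuterA, pvG]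
  | succ d ih =>
    intro k x hd
    by_cases hlast : tab.length ≤ k + 1
    · have hk : k < tab.length := by omega
      rw [PySem.List.pyRange_one_eq_nil (by omega)]
      rw [List.drop_eq_getElem_cons hk, List.drop_eq_nil_of_le (by omega)]
      cases x <;> simp [pvOuterA, pvG]
    · have hk : k < tab.length := by omega
      have hcast : ((k : Int) + 1) = ((k + 1 : Nat) : Int) := by push_cast; ring
      rw [PySem.List.pyRange_one_cons (by omega)]
      have hinner : pvInnerA tab (k : Int) (PySem.List.pyRange ((k : Int) + 1) (tab.length : Int) 1)
          = (tab.drop (k + 1)).contains tab[k] := by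
        rw [hcast]; exact pvInnerA_eq tab k hk (tab.length - (k + 1)) (k + 1) rfl (by omega)
      simp only [pvOuterA]
      rw [hinner, hcast]
      rw [List.drop_eq_getElem_cons hk]
      simp only [pvG]
      by_cases hcont : (tab.drop (k + 1)).contains tab[k] = true
      · rw [if_pos hcont]
        cases x
        · rw [if_pos rfl, ih (k + 1) true (by omega)]
          simp only [hcont, if_true, cond_true, cond_false, decide_eq_decide]
          omega
        · rw [if_neg (by simp)]
          simp only [hcont, if_true, cond_true]
          simp
      · rw [if_neg hcont, ih (k + 1) x (by omega)]
        have hcf : ((tab.drop (k + 1)).contains tab[k] = true) = False := by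
          simpa using hcont
        simp only [hcf, if_false, decide_eq_decide]
        omega

lemma pvG_eq (r : List Int) : pvG r = r.length - r.toFinset.card := by
  induction r with
  | nil => simp [pvG]
  | cons t r ih =>
    have hc := r.toFinset_card_le
    by_cases h : t ∈ r
    · have h1 : (t :: r).toFinset = r.toFinset := by
        simp [List.toFinset_cons, Finset.insert_eq_self.mpr (List.mem_toFinset.mpr h)]
      simp only [pvG, List.length_cons, h1]
      rw [if_pos (by simp [h]), ih]
      omega
    · have h1 : (t :: r).toFinset.card = r.toFinset.card + 1 := by
        rw [List.toFinset_cons, Finset.card_insert_of_notMem (by simpa using h)]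
      simp only [pvG, List.length_cons, h1]
      rw [if_neg (by simp [h]), ih]
      omega

lemma pvH_eq (r : List Int) : ∀ seen : List Int,
    pvH seen r = r.length - (r.toFinset \ seen.toFinset).card := by
  induction r with
  | nil => intro seen; simp [pvH]
  | cons t r ih =>
    intro seen
    have hc : (r.toFinset \ seen.toFinset).card ≤ r.length :=
      le_trans (Finset.card_le_card Finset.sdiff_subset) r.toFinset_card_le
    by_cases h : t ∈ seen
    · have hsd : (t :: r).toFinset \ seen.toFinset = r.toFinset \ seen.toFinset := by
        rw [List.toFinset_cons, Finset.insert_sdiff_of_mem _ (List.mem_toFinset.mpr h)]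
      simp only [pvH, List.length_cons, hsd]
      rw [if_pos (by simp [h]), ih seen]
      omega
    · have hc2 : (r.toFinset \ insert t seen.toFinset).card ≤ r.length :=
        le_trans (Finset.card_le_card Finset.sdiff_subset) r.toFinset_card_le
      have hsd : (t :: r).toFinset \ seen.toFinset
          = insert t (r.toFinset \ insert t seen.toFinset) := by
        ext a
        by_cases hat : a = t
        · subst hat; simp [h]
        · simp [hat]
      have hcard : ((t :: r).toFinset \ seen.toFinset).card
          = (r.toFinset \ insert t seen.toFinset).card + 1 := by
        rw [hsd, Finset.card_insert_of_notMem (by simp)]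
      have hseen : (seen ++ [t]).toFinset = insert t seen.toFinset := by
        ext a; simp [List.toFinset_append]
      simp only [pvH, List.length_cons, hcard]
      rw [if_neg (by simp [h]), ih (seen ++ [t]), hseen]
      omega

lemma pvLoopB_eq (r : List Int) : ∀ (seen : List Int) (count : Int),
    pvLoopB seen count r = count + (pvH seen r : Int) := by
  induction r with
  | nil => intro seen count; simp [pvLoopB, pvH]
  | cons t r ih =>
    intro seen count
    by_cases h : t ∈ seen
    · simp [pvLoopB, pvH, h, ih]
      ring
    · simp [pvLoopB, pvH, h, ih]

-- ===== VERDICT (by name: the statement is the Claim_ definition above) =====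
theorem rechDoublons_spec : Claim_equal_rechDoublons := by
  intro tab _
  unfold Spec_rechDoublons rechDoublons rechDoublons_alt
  have hA := pvOuterA_eq tab tab.length 0 false rfl
  simp only [Nat.cast_zero, List.drop_zero, cond_false, Nat.zero_add] at hA
  rw [hA, pvLoopB_eq tab [] 0, pvG_eq, pvH_eq]
  simp [Finset.sdiff_empty]
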